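-- pv_equiv track=rewrite | github.com/AdamZhouSE/pythonHomework | Code/CodeRecords/2112/60710/267278.py | solve
-- ===== SOURCE A (Python) =====
-- def solve(num):
--     re=[] #用来存储相应位置的元素出现了几次
--     n=0
--     for i in range(0,len(num)):
--         a=num.count(i+1)
--         re.append(a)
--     for k in range(0,len(re)):
--         if re[k]==0:
--             n=k+1
--     return n
-- ===== SOURCE B (Python) =====
-- def solve(num):
--     present = set(num)
--     missing = set(range(1, len(num) + 1)) - present
--     return max(missing) if missing else 0
-- ===== Notes on version B (the rewrite author's own statement) =====
-- stated objective: simpler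
-- what changed: Replaces the count-list construction (len(num) calls to num.count, O(n^2)) and the keep-last index scan with a set difference full(1..n) - set(num) followed by a single max reduction (max of the missing values equals the last missing index+1).
import Mathlib
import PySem

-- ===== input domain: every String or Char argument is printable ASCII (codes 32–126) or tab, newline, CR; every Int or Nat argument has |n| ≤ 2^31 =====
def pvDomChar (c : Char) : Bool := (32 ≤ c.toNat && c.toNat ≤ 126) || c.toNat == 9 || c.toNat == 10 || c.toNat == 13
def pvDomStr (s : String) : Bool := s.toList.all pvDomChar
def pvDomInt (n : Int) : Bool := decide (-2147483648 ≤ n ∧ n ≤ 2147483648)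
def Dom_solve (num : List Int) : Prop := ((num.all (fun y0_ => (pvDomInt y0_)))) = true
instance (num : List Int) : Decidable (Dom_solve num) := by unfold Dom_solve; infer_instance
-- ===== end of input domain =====

-- B replaces A's count-list construction plus keep-last index scan by a set difference
-- (1..len(num) minus the elements) followed by one max reduction; return value only.

-- ===== PORT A =====
def solve (num : List Int) : Int :=
  let re : List Int :=
    (PySem.List.pyRange 0 (PySem.List.len num) 1).foldl
      (fun re i => re ++ [(PySem.List.count num (i + 1) : Int)]) []
  (PySem.List.pyRange 0 (PySem.List.len re) 1).foldl
    (fun n k => if PySem.List.pyGetD re k 0 = 0 then k + 1 else n) 0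

-- ===== PORT B =====
def solve_alt (num : List Int) : Int :=
  let present : PySem.Set Int := PySem.Set.ofList num
  let missing : PySem.Set Int :=
    PySem.Set.diff (PySem.Set.ofList (PySem.List.pyRange 1 (PySem.List.len num + 1) 1)) present
  match PySem.List.max? missing (fun x => x) with
  | some m => m
  | none => 0

-- ===== PRECONDITION & SPEC =====
def Spec_solve (num : List Int) (out : Int) : Prop := out = solve_alt num
instance (num : List Int) (out : Int) : Decidable (Spec_solve num out) := by unfold Spec_solve; infer_instance

-- ===== CLAIM (what is proved, stated in full; the proofs are below) =====
def Claim_equal_solve : Prop := ∀ (num : List Int), Dom_solve num → Spec_solve num (solve num)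

-- ===== LEMMAS AND PROOFS =====

-- max of L ++ [x] is x when every element of L is below x
theorem pv_max_last (L : List Int) (x : Int) (h : ∀ y ∈ L, y < x) :
    PySem.List.max? (L ++ [x]) (fun y => y) = some x := by
  cases hm : PySem.List.max? (L ++ [x]) (fun y => y) with
  | none =>
      rw [PySem.List.max?_eq_none_iff] at hm
      simp at hm
  | some m =>
      have hmem := PySem.List.max?_mem hm
      have hmax := PySem.List.max?_isMax hm
      have hx : x ≤ m := hmax x (by simp)
      rcases List.mem_append.mp hmem with h1 | h2
      · exact absurd hx (not_le.mpr (h m h1))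
      · simp_all

-- the keep-last fold over an increasing range equals max of the missing values
theorem pv_key (q : Int → Bool) (n : Nat) :
    (PySem.List.pyRange 0 (n : Int) 1).foldl
      (fun acc k => if q (k + 1) then k + 1 else acc) 0
    = (match PySem.List.max? ((PySem.List.pyRange 1 ((n : Int) + 1) 1).filter q)
          (fun x => x) with
       | some m => m
       | none => 0) := by
  induction n with
  | zero =>
      simp [show PySem.List.max? ([] : List Int) (fun x => x) = none from
        (PySem.List.max?_eq_none_iff _ _).mpr rfl]
  | succ n ih =>
      have hA : PySem.List.pyRange 0 ((n + 1 : Nat) : Int) 1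
          = PySem.List.pyRange 0 (n : Int) 1 ++ [(n : Int)] := by
        push_cast
        exact PySem.List.pyRange_one_succ_right (by positivity)
      have hB : PySem.List.pyRange 1 (((n + 1 : Nat) : Int) + 1) 1
          = PySem.List.pyRange 1 ((n : Int) + 1) 1 ++ [(n : Int) + 1] := by
        push_cast
        exact PySem.List.pyRange_one_succ_right (by omega)
      rw [hA, hB, List.foldl_append, ih, List.filter_append]
      by_cases hq : q ((n : Int) + 1)
      · have hlt : ∀ y ∈ (PySem.List.pyRange 1 ((n : Int) + 1) 1).filter q, y < (n : Int) + 1 := by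
          intro y hy
          have := List.mem_of_mem_filter hy
          exact ((PySem.List.mem_pyRange_one).mp this).2
        simp [hq, pv_max_last _ _ hlt]
      · simp [hq]

theorem solve_spec_aux : ∀ (num : List Int), solve num = solve_alt num := by
  intro num
  unfold solve solve_alt
  have hre : ((PySem.List.pyRange 0 (PySem.List.len num) 1).foldl
      (fun re i => re ++ [(PySem.List.count num (i + 1) : Int)]) [])
      = (PySem.List.pyRange 0 (num.length : Int) 1).map
          (fun i => (PySem.List.count num (i + 1) : Int)) := by
    simp
    induction (PySem.List.pyRange 0 (num.length : Int) 1) with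
    | nil => simp
    | cons x t iht => simp [iht]
  simp only [hre]
  have hlen : PySem.List.len ((PySem.List.pyRange 0 (num.length : Int) 1).map
      (fun i => (PySem.List.count num (i + 1) : Int))) = (num.length : Int) := by
    simp [PySem.List.length_pyRange_one]
  rw [hlen]
  -- replace the indexed access by the mapped value, and the count test by a membership test
  have hfold : (PySem.List.pyRange 0 (num.length : Int) 1).foldl
      (fun acc k => if PySem.List.pyGetD ((PySem.List.pyRange 0 (num.length : Int) 1).map
          (fun i => (PySem.List.count num (i + 1) : Int))) k 0 = 0 then k + 1 else acc) 0
      = (PySem.List.pyRange 0 (num.length : Int) 1).foldl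
      (fun acc k => if (!(num.contains (k + 1))) then k + 1 else acc) 0 := by
    apply PySem.List.foldl_congr_mem
    intro acc k hk
    obtain ⟨hk0, hkn⟩ := (PySem.List.mem_pyRange_one).mp hk
    rw [PySem.List.pyGetD_map_pyRange_of_nonneg _ _ _ _ hk0 hkn]
    have : ((PySem.List.count num (k + 1) : Int) = 0) ↔ ((!(num.contains (k + 1))) = true) := by
      simp [PySem.List.count, List.count_eq_zero]
    simp only [this]
  rw [hfold, pv_key (fun j => !(num.contains j)) num.length]
  have hmiss : PySem.Set.diff
      (PySem.Set.ofList (PySem.List.pyRange 1 (PySem.List.len num + 1) 1))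
      (PySem.Set.ofList num)
      = (PySem.List.pyRange 1 ((num.length : Int) + 1) 1).filter (fun j => !(num.contains j)) := by
    simp [PySem.Set.diff, PySem.Set.ofList_eq_self_of_nodup _ (PySem.List.nodup_pyRange_one _ _)]
  rw [hmiss]

-- ===== VERDICT (by name: the statement is the Claim_ definition above) =====
theorem solve_spec : Claim_equal_solve := by
  intro num _
  unfold Spec_solve
  exact solve_spec_aux num
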